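-- pv_equiv track=rewrite | github.com/gatihe/tcc-simulador | app/engine.py | check_for_prereq
-- ===== SOURCE A (Python) =====
-- def check_for_prereq(subject_to_check, prereqs_list):
--     cont1 = 0
--     prereqs_for_subject = []
--     while (cont1 < len(prereqs_list)):
--         if prereqs_list[cont1] == subject_to_check and cont1 % 2 != 0:
--             prereqs_for_subject.append(prereqs_list[cont1 - 1])
--         cont1 = cont1 + 1
--     return prereqs_for_subject
-- ===== SOURCE B (Python) =====
-- def check_for_prereq(subject_to_check, prereqs_list):
--     it = iter(prereqs_list)
--     return [pre for pre, subj in zip(it, it) if subj == subject_to_check]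
-- ===== Notes on version B (the rewrite author's own statement) =====
-- stated objective: simpler
-- what changed: Replaces the index-counting while loop with its parity test and back-index by a single comprehension over consecutive (prereq, subject) pairs drawn two at a time from one iterator; zip's truncation handles an odd trailing element.
import Mathlib
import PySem

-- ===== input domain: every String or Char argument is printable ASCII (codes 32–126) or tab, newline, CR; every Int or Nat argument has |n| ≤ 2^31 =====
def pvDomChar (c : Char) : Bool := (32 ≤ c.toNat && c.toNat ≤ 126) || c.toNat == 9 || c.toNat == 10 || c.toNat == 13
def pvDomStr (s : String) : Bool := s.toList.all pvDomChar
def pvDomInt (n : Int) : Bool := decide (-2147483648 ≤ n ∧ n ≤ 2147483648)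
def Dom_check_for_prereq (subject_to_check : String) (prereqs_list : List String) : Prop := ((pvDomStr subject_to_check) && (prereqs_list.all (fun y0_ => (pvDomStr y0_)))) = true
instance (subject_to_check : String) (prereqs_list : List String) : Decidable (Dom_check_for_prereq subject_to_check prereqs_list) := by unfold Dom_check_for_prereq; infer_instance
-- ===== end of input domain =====

-- B replaces A's index-counting while loop (parity test + back-index) by a structural
-- recursion over (prereq, subject) pairs, two list elements at a time: simpler.


-- ===== PORT A =====
-- the while loop: cont1 counts 0,1,2,…; both indexings are always in range
-- (cont1 < len, and cont1 - 1 ≥ 0 since cont1 is odd there), so List.getD is exact.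
def check_for_prereq_loop (subject_to_check : String) (prereqs_list : List String)
    (cont1 : Nat) (acc : List String) : List String :=
  if _h : cont1 < prereqs_list.length then
    check_for_prereq_loop subject_to_check prereqs_list (cont1 + 1)
      (if prereqs_list.getD cont1 "" == subject_to_check && cont1 % 2 != 0 then
        acc ++ [prereqs_list.getD (cont1 - 1) ""]
      else acc)
  else acc
termination_by prereqs_list.length - cont1

def check_for_prereq (subject_to_check : String) (prereqs_list : List String) : List String :=
  check_for_prereq_loop subject_to_check prereqs_list 0 []

-- ===== PORT B =====
def check_for_prereq_go (subject_to_check : String) : List String → List String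
  | pre :: subj :: rest =>
      let tail := check_for_prereq_go subject_to_check rest
      if subj == subject_to_check then pre :: tail else tail
  | _ => []

def check_for_prereq_alt (subject_to_check : String) (prereqs_list : List String) : List String :=
  check_for_prereq_go subject_to_check prereqs_list

-- ===== PRECONDITION & SPEC =====
def Spec_check_for_prereq (subject_to_check : String) (prereqs_list : List String) (out : List String) : Prop := out = check_for_prereq_alt subject_to_check prereqs_list
instance (subject_to_check : String) (prereqs_list : List String) (out : List String) : Decidable (Spec_check_for_prereq subject_to_check prereqs_list out) := by unfold Spec_check_for_prereq; infer_instance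

-- ===== CLAIM (what is proved, stated in full; the proofs are below) =====
def Claim_equal_check_for_prereq : Prop := ∀ (subject_to_check : String) (prereqs_list : List String), Dom_check_for_prereq subject_to_check prereqs_list → Spec_check_for_prereq subject_to_check prereqs_list (check_for_prereq subject_to_check prereqs_list)

-- ===== LEMMAS AND PROOFS =====
-- Loop invariant: from an even index i, A's loop appends exactly B's pair-recursion
-- on the remaining suffix.
theorem check_for_prereq_loop_eq (s : String) (xs : List String) :
    ∀ i acc, i % 2 = 0 →
      check_for_prereq_loop s xs i acc = acc ++ check_for_prereq_go s (xs.drop i) := by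
  intro i acc hi
  induction hxs : xs.length - i using Nat.strong_induction_on generalizing i acc with
  | _ n ih =>
  subst hxs
  rw [check_for_prereq_loop]
  by_cases h1 : i < xs.length
  · simp only [h1, dif_pos]
    have he : (i % 2 != 0) = false := by simp [hi]
    rw [check_for_prereq_loop]
    by_cases h2 : i + 1 < xs.length
    · simp only [h2, dif_pos, he, Bool.and_false, Bool.false_eq_true, if_false]
      have h2e : ((i + 1) % 2 != 0) = true := by
        have : (i + 1) % 2 = 1 := by omega
        simp [this]
      have hstep : check_for_prereq_loop s xs (i + 1 + 1)
          (if xs.getD (i+1) "" == s && ((i+1) % 2 != 0) then acc ++ [xs.getD (i + 1 - 1) ""] else acc)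
          = (if xs.getD (i+1) "" == s && ((i+1) % 2 != 0) then acc ++ [xs.getD (i + 1 - 1) ""] else acc)
            ++ check_for_prereq_go s (xs.drop (i + 2)) :=
        ih (xs.length - (i + 2)) (by omega) (i + 2) _ (by omega) rfl
      rw [hstep]
      have hdrop : xs.drop i = xs[i] :: xs[i+1] :: xs.drop (i + 2) := by
        rw [List.drop_eq_getElem_cons h1, List.drop_eq_getElem_cons h2]
      rw [hdrop]
      simp only [check_for_prereq_go, h2e, Bool.and_true,
        List.getD_eq_getElem _ _ h1, List.getD_eq_getElem _ _ h2, Nat.add_sub_cancel]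
      by_cases hc : xs[i+1] == s <;> simp [hc]
    · -- odd trailing element: loop stops with acc, pair recursion yields []
      simp only [h2, dif_neg, not_false_iff, he, Bool.and_false, Bool.false_eq_true, if_false]
      have hdrop : xs.drop i = [xs[i]] := by
        rw [List.drop_eq_getElem_cons h1, List.drop_eq_nil_iff.mpr (by omega)]
      rw [hdrop]
      simp [check_for_prereq_go]
  · simp only [h1, dif_neg, not_false_iff]
    rw [List.drop_eq_nil_iff.mpr (by omega)]
    simp [check_for_prereq_go]

-- ===== VERDICT (by name: the statement is the Claim_ definition above) =====
theorem check_for_prereq_spec : Claim_equal_check_for_prereq := by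
  intro s xs _
  unfold Spec_check_for_prereq check_for_prereq check_for_prereq_alt
  simpa using check_for_prereq_loop_eq s xs 0 [] rfl
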